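-- pv_equiv track=rewrite | github.com/yeolsim2hajo/Team_hard | wonkyoung/programmers/level 2/[1차]_뉴스_클러스터링.py | solution
-- ===== SOURCE A (Python) =====
-- def solution(str1, str2):
--     str1 = str1.lower()
--     str2 = str2.lower()
--     intersection = union = 0
--     cnt = {}
--     for i in range(len(str1)-1):
--         alp = str1[i:i+2]
--         if alp.isalpha():
--             if cnt.get(alp):
--                 cnt[alp] += 1
--             else:
--                 cnt[alp] = 1
--             union += 1
--
--     for i in range(len(str2) - 1):
--         alp = str2[i:i + 2]
--         if alp.isalpha():
--             if cnt.get(alp):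
--                 cnt[alp] -= 1
--                 intersection += 1
--             else:
--                 union += 1
--     answer = 65536 if union == 0 else (intersection * 65536)//union
--     return answer
-- ===== SOURCE B (Python) =====
-- def _sorted_bigrams(s):
--     s = s.lower()
--     return sorted(s[i:i + 2] for i in range(len(s) - 1) if s[i:i + 2].isalpha())
--
--
-- def solution(str1, str2):
--     a = _sorted_bigrams(str1)
--     b = _sorted_bigrams(str2)
--     i = j = inter = 0
--     while i < len(a) and j < len(b):
--         if a[i] == b[j]:
--             inter += 1
--             i += 1
--             j += 1
--         elif a[i] < b[j]:
--             i += 1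
--         else:
--             j += 1
--     union = len(a) + len(b) - inter
--     return 65536 if union == 0 else inter * 65536 // union
-- ===== Notes on version B (the rewrite author's own statement) =====
-- stated objective: alternative
-- what changed: Replaces A's hash-table counting (build a count dict from str1's bigrams, then a second interleaved pass over str2's bigrams decrementing counts while accumulating intersection and union) with a sort-and-merge algorithm: each string's alphabetic bigrams are collected and sorted, and the multiset intersection is counted by a two-pointer merge over the two sorted lists; union = len1 + len2 - intersection.
import Mathlib
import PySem

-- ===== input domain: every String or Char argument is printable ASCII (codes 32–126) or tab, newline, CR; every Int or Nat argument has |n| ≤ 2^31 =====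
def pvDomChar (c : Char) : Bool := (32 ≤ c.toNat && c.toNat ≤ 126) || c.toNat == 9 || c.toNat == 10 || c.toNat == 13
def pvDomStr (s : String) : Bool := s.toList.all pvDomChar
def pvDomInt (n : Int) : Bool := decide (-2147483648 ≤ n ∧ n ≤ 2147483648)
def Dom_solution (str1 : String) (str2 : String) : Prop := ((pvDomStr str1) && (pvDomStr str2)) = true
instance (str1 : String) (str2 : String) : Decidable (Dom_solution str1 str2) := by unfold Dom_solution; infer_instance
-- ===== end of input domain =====

-- B replaces A's hash-table counting (one count dict, then an interleaved decrement pass) with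
-- sort-and-merge: each string's alphabetic bigrams are sorted and the multiset intersection is
-- counted by a two-pointer merge of the two sorted lists; alternative algorithm, similar cost.

-- ===== PORT A =====
-- A: one count table, built from str1's bigrams (union counts them), then a second pass over
-- str2's bigrams that decrements matching counts (intersection) or bumps union.
def solution (str1 : String) (str2 : String) : Int :=
  let s1 := PySem.Str.lower str1
  let s2 := PySem.Str.lower str2
  let st1 := (PySem.List.pyRange 0 (PySem.Str.len s1 - 1) 1).foldl
    (fun (st : PySem.Dict String Int × Int) i =>
      let alp := PySem.Str.slice s1 (some i) (some (i + 2))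
      if PySem.Str.strIsalpha alp then
        -- `cnt.get(alp)` is truthy exactly when the stored int is present and nonzero
        ((if st.1.getD alp 0 ≠ 0 then st.1.insert alp (st.1.getD alp 0 + 1)
          else st.1.insert alp 1), st.2 + 1)
      else st)
    (PySem.Dict.empty, 0)
  let st2 := (PySem.List.pyRange 0 (PySem.Str.len s2 - 1) 1).foldl
    (fun (st : PySem.Dict String Int × Int × Int) i =>
      let alp := PySem.Str.slice s2 (some i) (some (i + 2))
      if PySem.Str.strIsalpha alp then
        if st.1.getD alp 0 ≠ 0 then
          (st.1.insert alp (st.1.getD alp 0 - 1), st.2.1 + 1, st.2.2)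
        else (st.1, st.2.1, st.2.2 + 1)
      else st)
    (st1.1, 0, st1.2)
  if st2.2.2 = 0 then 65536 else PySem.Int.floordiv (st2.2.1 * 65536) st2.2.2

-- ===== PORT B =====
-- Source B's `_sorted_bigrams`: collect the alphabetic bigrams of the lowercased string, sorted.
def sortedBigrams (s : String) : List String :=
  let sl := PySem.Str.lower s
  PySem.List.sorted
    (((PySem.List.pyRange 0 (PySem.Str.len sl - 1) 1).map
        (fun i => PySem.Str.slice sl (some i) (some (i + 2)))).filter
      (fun b => PySem.Str.strIsalpha b))
    (fun x => x) false

-- Source B's two-pointer while loop over the two sorted lists, as the obvious recursion on suffixes.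
def interCount : List String → List String → Int
  | x :: a, y :: b =>
      if x = y then interCount a b + 1
      else if x < y then interCount a (y :: b)
      else interCount (x :: a) b
  | _, _ => 0
termination_by a b => a.length + b.length

def solution_alt (str1 : String) (str2 : String) : Int :=
  let a := sortedBigrams str1
  let b := sortedBigrams str2
  let inter := interCount a b
  let union := (a.length : Int) + (b.length : Int) - inter
  if union = 0 then 65536 else PySem.Int.floordiv (inter * 65536) union

-- ===== PRECONDITION & SPEC =====
def Spec_solution (str1 : String) (str2 : String) (out : Int) : Prop := out = solution_alt str1 str2
instance (str1 : String) (str2 : String) (out : Int) : Decidable (Spec_solution str1 str2 out) := by unfold Spec_solution; infer_instance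

-- ===== CLAIM (what is proved, stated in full; the proofs are below) =====
def Claim_equal_solution : Prop := ∀ (str1 : String) (str2 : String), Dom_solution str1 str2 → Spec_solution str1 str2 (solution str1 str2)

-- ===== LEMMAS AND PROOFS =====

/-- All consecutive 2-character slices of a character list, as strings. -/
def pvPairs : List Char → List String
  | a :: b :: t => String.ofList [a, b] :: pvPairs (b :: t)
  | _ => []

/-- The lowercased alphabetic bigrams both programs actually process. -/
def pvBigs (s : String) : List String :=
  (pvPairs (PySem.Str.lower s).toList).filter (fun b => PySem.Str.strIsalpha b)

/-- The common value both programs compute for the intersection size. -/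
def pvInterVal (s1 s2 : String) : Int :=
  ∑ k ∈ (pvBigs s1).toFinset,
    min (((pvBigs s1).count k : Int)) (((pvBigs s2).count k : Int))

lemma foldl_range_take2 {σ : Type} (g : σ → String → σ) :
    ∀ (l : List Char) (init : σ),
      (List.range (l.length - 1)).foldl
          (fun st k => g st (String.ofList ((l.drop k).take 2))) init
        = (pvPairs l).foldl g init
  | [], _ => by simp [pvPairs]
  | [_], _ => by simp [pvPairs]
  | a :: b :: t, init => by
      have hlen : (a :: b :: t).length - 1 = t.length + 1 := by simp
      rw [hlen, List.range_succ_eq_map, List.foldl_cons, List.foldl_map]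
      simp only [List.drop_zero, List.take_succ_cons, List.take_zero, List.drop_succ_cons]
      rw [show (pvPairs (a :: b :: t)).foldl g init
            = (pvPairs (b :: t)).foldl g (g init (String.ofList [a, b])) from rfl]
      exact foldl_range_take2 g (b :: t) (g init (String.ofList [a, b]))

/-- A `for i in range(len(s)-1)` loop over the slices `s[i:i+2]` is a fold over `pvPairs`. -/
lemma foldl_pyRange_bigrams {σ : Type} (s : String) (h : σ → String → σ) (init : σ) :
    (PySem.List.pyRange 0 (PySem.Str.len s - 1) 1).foldl
        (fun st i => h st (PySem.Str.slice s (some i) (some (i + 2)))) init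
      = (pvPairs s.toList).foldl h init := by
  rw [PySem.List.pyRange_one]
  simp only [List.foldl_map]
  have hbody : (fun (st : σ) (k : Nat) =>
      h st (PySem.Str.slice s (some (0 + (k : Int))) (some (0 + (k : Int) + 2))))
      = fun st k => h st (String.ofList ((s.toList.drop k).take 2)) := by
    funext st k
    simp only [PySem.Str.slice, PySem.Chars.slice_eq_listSlice]
    rw [show (0 + (k : Int)) = ((k : Nat) : Int) by ring]
    rw [show (((k : Nat) : Int) + 2) = ((k + 2 : Nat) : Int) by push_cast; ring]
    rw [PySem.List.slice_natCast, Nat.add_sub_cancel_left]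
  rw [hbody]
  have htn : (PySem.Str.len s - 1 - 0).toNat = s.toList.length - 1 := by
    have := PySem.Str.len_eq s
    omega
  rw [htn]
  exact foldl_range_take2 h s.toList init

lemma foldl_filter_if {σ : Type} (p : String → Bool) (f : σ → String → σ) :
    ∀ (l : List String) (init : σ),
      l.foldl (fun st b => if p b then f st b else st) init
        = (l.filter p).foldl f init
  | [], _ => rfl
  | x :: xs, init => by
      by_cases hx : p x <;>
        simp [hx, foldl_filter_if p f xs]

/-- A's first loop: the count table plus a running length. -/
lemma loopA1_eq :
    ∀ (l : List String) (d : PySem.Dict String Int) (u : Int),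
      l.foldl (fun (st : PySem.Dict String Int × Int) b =>
          ((if st.1.getD b 0 ≠ 0 then st.1.insert b (st.1.getD b 0 + 1)
            else st.1.insert b 1), st.2 + 1)) (d, u)
        = (l.foldl (fun d b => d.insert b (d.getD b 0 + 1)) d, u + (l.length : Int))
  | [], d, u => by simp
  | x :: xs, d, u => by
      have hstep : (if d.getD x 0 ≠ 0 then d.insert x (d.getD x 0 + 1)
          else d.insert x 1) = d.insert x (d.getD x 0 + 1) := by
        split_ifs with h
        · rfl
        · rw [not_not.mp h]; norm_num
      rw [List.foldl_cons, List.foldl_cons, hstep, loopA1_eq xs _ (u + 1)]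
      refine Prod.ext rfl ?_
      simp only [List.length_cons]
      push_cast
      ring

/-- The number of str2-bigrams A greedily matches against counts `f`. -/
def pvMatch : (String → Int) → List String → Int
  | _, [] => 0
  | f, x :: xs =>
      if f x ≠ 0 then 1 + pvMatch (fun y => if y = x then f x - 1 else f y) xs
      else pvMatch f xs

lemma pvMatch_congr : ∀ (l : List String) (f g : String → Int), (∀ y, f y = g y) →
    pvMatch f l = pvMatch g l
  | [], _, _, _ => rfl
  | x :: xs, f, g, hfg => by
      simp only [pvMatch, hfg x]
      split_ifs with h
      · rw [pvMatch_congr xs (fun y => if y = x then g x - 1 else f y)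
          (fun y => if y = x then g x - 1 else g y)
          (fun y => by by_cases hy : y = x <;> simp [hy, hfg y])]
      · exact pvMatch_congr xs f g hfg

/-- A's second loop: the intersection and union counters in terms of `pvMatch`. -/
lemma loopA2_eq :
    ∀ (l : List String) (d : PySem.Dict String Int) (i u : Int),
      (l.foldl (fun (st : PySem.Dict String Int × Int × Int) b =>
          if st.1.getD b 0 ≠ 0 then
            (st.1.insert b (st.1.getD b 0 - 1), st.2.1 + 1, st.2.2)
          else (st.1, st.2.1, st.2.2 + 1)) (d, i, u)).2
        = (i + pvMatch (fun k => d.getD k 0) l,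
           u + (l.length : Int) - pvMatch (fun k => d.getD k 0) l)
  | [], d, i, u => by simp [pvMatch]
  | x :: xs, d, i, u => by
      rw [List.foldl_cons]
      by_cases h : d.getD x 0 ≠ 0
      · rw [if_pos h, loopA2_eq xs _ (i + 1) u]
        have hf : ∀ y, (d.insert x (d.getD x 0 - 1)).getD y 0
            = (fun y => if y = x then d.getD x 0 - 1 else d.getD y 0) y := by
          intro y; simp [PySem.Dict.getD_insert]
        rw [pvMatch_congr xs _ _ hf]
        simp only [pvMatch, if_pos h]
        refine Prod.ext (by dsimp only; ring) ?_
        dsimp only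
        simp only [List.length_cons]
        push_cast
        ring
      · rw [if_neg h, loopA2_eq xs d i (u + 1)]
        simp only [pvMatch, if_neg h]
        refine Prod.ext rfl ?_
        dsimp only
        simp only [List.length_cons]
        push_cast
        ring

/-- Greedy matching against nonnegative counts is the sum of per-key minima. -/
lemma pvMatch_eq_sum (S : Finset String) :
    ∀ (l : List String) (f : String → Int), (∀ k, 0 ≤ f k) →
      (∀ k ∈ l, f k ≠ 0 → k ∈ S) →
      pvMatch f l = ∑ k ∈ S, min (f k) ((l.count k : Int))
  | [], f, hf, _ => by
      simp only [pvMatch, List.count_nil, Nat.cast_zero]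
      rw [Finset.sum_congr rfl (fun k _ => min_eq_right (hf k))]
      simp
  | x :: xs, f, hf, hS => by
      by_cases hx : f x ≠ 0
      · have hxS : x ∈ S := hS x List.mem_cons_self hx
        have hf' : ∀ k, 0 ≤ (fun y => if y = x then f x - 1 else f y) k := by
          intro k
          by_cases hk : k = x
          · simp only [hk]
            have := hf x; omega
          · simp only [if_neg hk]
            exact hf k
        have hS' : ∀ k ∈ xs, (fun y => if y = x then f x - 1 else f y) k ≠ 0 → k ∈ S := by
          intro k hk hne
          by_cases hkx : k = x
          · exact hkx ▸ hxS
          · exact hS k (List.mem_cons_of_mem _ hk) (by simpa [hkx] using hne)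
        simp only [pvMatch, if_pos hx]
        rw [pvMatch_eq_sum S xs _ hf' hS']
        rw [← Finset.add_sum_erase S _ hxS, ← Finset.add_sum_erase S
          (fun k => min (f k) (((x :: xs).count k : Int))) hxS]
        have htail : ∑ k ∈ S.erase x,
            min ((fun y => if y = x then f x - 1 else f y) k) ((xs.count k : Int))
            = ∑ k ∈ S.erase x, min (f k) (((x :: xs).count k : Int)) := by
          refine Finset.sum_congr rfl (fun k hk => ?_)
          have hkx : k ≠ x := Finset.ne_of_mem_erase hk
          simp [Ne.symm hkx, hkx]
        rw [htail]
        have hcnt : (((x :: xs).count x : Nat) : Int) = (xs.count x : Int) + 1 := by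
          simp
        rw [if_pos rfl, hcnt]
        have h0 := hf x
        omega
      · have hx0 : f x = 0 := not_not.mp hx
        simp only [pvMatch, if_neg hx]
        rw [pvMatch_eq_sum S xs f hf (fun k hk => hS k (List.mem_cons_of_mem _ hk))]
        refine Finset.sum_congr rfl (fun k _ => ?_)
        by_cases hkx : k = x
        · subst hkx
          rw [hx0, min_eq_left (Int.natCast_nonneg _), min_eq_left (Int.natCast_nonneg _)]
        · simp [Ne.symm hkx]

lemma counter_getD_fun (l : List String) :
    ∀ y, (PySem.Dict.counter l).getD y 0 = (fun k => ((l.count k : Nat) : Int)) y := by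
  intro y
  simp [PySem.Dict.getD_counter]

set_option maxHeartbeats 1600000 in
/-- A's whole computation, in closed form. -/
lemma solution_eqn (s1 s2 : String) :
    solution s1 s2 =
      (if ((pvBigs s1).length : Int) + ((pvBigs s2).length : Int) - pvInterVal s1 s2 = 0
       then 65536
       else PySem.Int.floordiv (pvInterVal s1 s2 * 65536)
         (((pvBigs s1).length : Int) + ((pvBigs s2).length : Int) - pvInterVal s1 s2)) := by
  have h1 : ((PySem.List.pyRange 0 (PySem.Str.len (PySem.Str.lower s1) - 1) 1).foldl
      (fun (st : PySem.Dict String Int × Int) i =>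
        let alp := PySem.Str.slice (PySem.Str.lower s1) (some i) (some (i + 2))
        if PySem.Str.strIsalpha alp then
          ((if st.1.getD alp 0 ≠ 0 then st.1.insert alp (st.1.getD alp 0 + 1)
            else st.1.insert alp 1), st.2 + 1)
        else st) (PySem.Dict.empty, 0))
      = (PySem.Dict.counter (pvBigs s1), (0 : Int) + ((pvBigs s1).length : Int)) := by
    calc ((PySem.List.pyRange 0 (PySem.Str.len (PySem.Str.lower s1) - 1) 1).foldl
        (fun (st : PySem.Dict String Int × Int) i =>
          let alp := PySem.Str.slice (PySem.Str.lower s1) (some i) (some (i + 2))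
          if PySem.Str.strIsalpha alp then
            ((if st.1.getD alp 0 ≠ 0 then st.1.insert alp (st.1.getD alp 0 + 1)
              else st.1.insert alp 1), st.2 + 1)
          else st) (PySem.Dict.empty, 0))
        = (pvPairs (PySem.Str.lower s1).toList).foldl
            (fun (st : PySem.Dict String Int × Int) b =>
              if PySem.Str.strIsalpha b then
                ((if st.1.getD b 0 ≠ 0 then st.1.insert b (st.1.getD b 0 + 1)
                  else st.1.insert b 1), st.2 + 1)
              else st) (PySem.Dict.empty, 0) :=
          foldl_pyRange_bigrams (PySem.Str.lower s1)
            (fun (st : PySem.Dict String Int × Int) b =>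
              if PySem.Str.strIsalpha b then
                ((if st.1.getD b 0 ≠ 0 then st.1.insert b (st.1.getD b 0 + 1)
                  else st.1.insert b 1), st.2 + 1)
              else st) (PySem.Dict.empty, 0)
      _ = (pvBigs s1).foldl
            (fun (st : PySem.Dict String Int × Int) b =>
              ((if st.1.getD b 0 ≠ 0 then st.1.insert b (st.1.getD b 0 + 1)
                else st.1.insert b 1), st.2 + 1)) (PySem.Dict.empty, 0) :=
          foldl_filter_if _ _ _ _
      _ = ((pvBigs s1).foldl (fun d b => d.insert b (d.getD b 0 + 1)) PySem.Dict.empty,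
            (0 : Int) + ((pvBigs s1).length : Int)) := loopA1_eq _ _ _
      _ = (PySem.Dict.counter (pvBigs s1), (0 : Int) + ((pvBigs s1).length : Int)) := by
          rw [PySem.Dict.foldl_insert_getD_add_one_eq_counter]
  have h2 : ∀ (d : PySem.Dict String Int) (i u : Int),
      (((PySem.List.pyRange 0 (PySem.Str.len (PySem.Str.lower s2) - 1) 1).foldl
        (fun (st : PySem.Dict String Int × Int × Int) i =>
          let alp := PySem.Str.slice (PySem.Str.lower s2) (some i) (some (i + 2))
          if PySem.Str.strIsalpha alp then
            if st.1.getD alp 0 ≠ 0 then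
              (st.1.insert alp (st.1.getD alp 0 - 1), st.2.1 + 1, st.2.2)
            else (st.1, st.2.1, st.2.2 + 1)
          else st) (d, i, u))).2
      = (i + pvMatch (fun k => d.getD k 0) (pvBigs s2),
         u + ((pvBigs s2).length : Int) - pvMatch (fun k => d.getD k 0) (pvBigs s2)) := by
    intro d i u
    have e1 : ((PySem.List.pyRange 0 (PySem.Str.len (PySem.Str.lower s2) - 1) 1).foldl
        (fun (st : PySem.Dict String Int × Int × Int) i =>
          let alp := PySem.Str.slice (PySem.Str.lower s2) (some i) (some (i + 2))
          if PySem.Str.strIsalpha alp then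
            if st.1.getD alp 0 ≠ 0 then
              (st.1.insert alp (st.1.getD alp 0 - 1), st.2.1 + 1, st.2.2)
            else (st.1, st.2.1, st.2.2 + 1)
          else st) (d, i, u))
        = (pvPairs (PySem.Str.lower s2).toList).foldl
            (fun (st : PySem.Dict String Int × Int × Int) b =>
              if PySem.Str.strIsalpha b then
                if st.1.getD b 0 ≠ 0 then
                  (st.1.insert b (st.1.getD b 0 - 1), st.2.1 + 1, st.2.2)
                else (st.1, st.2.1, st.2.2 + 1)
              else st) (d, i, u) :=
      foldl_pyRange_bigrams (PySem.Str.lower s2)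
        (fun (st : PySem.Dict String Int × Int × Int) b =>
          if PySem.Str.strIsalpha b then
            if st.1.getD b 0 ≠ 0 then
              (st.1.insert b (st.1.getD b 0 - 1), st.2.1 + 1, st.2.2)
            else (st.1, st.2.1, st.2.2 + 1)
          else st) (d, i, u)
    rw [e1, foldl_filter_if
      (fun b => PySem.Str.strIsalpha b)
      (fun (st : PySem.Dict String Int × Int × Int) b =>
        if st.1.getD b 0 ≠ 0 then
          (st.1.insert b (st.1.getD b 0 - 1), st.2.1 + 1, st.2.2)
        else (st.1, st.2.1, st.2.2 + 1))]
    exact loopA2_eq (pvBigs s2) d i u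
  have hM : pvMatch (fun k => (PySem.Dict.counter (pvBigs s1) : PySem.Dict String Int).getD k 0)
      (pvBigs s2) = pvInterVal s1 s2 := by
    rw [pvMatch_congr (pvBigs s2) _ _ (counter_getD_fun (pvBigs s1))]
    refine (pvMatch_eq_sum (pvBigs s1).toFinset (pvBigs s2) _
      (fun k => Int.natCast_nonneg _) ?_)
    intro k _ hne
    rw [List.mem_toFinset]
    by_contra hnm
    exact hne (by simp [List.count_eq_zero_of_not_mem hnm])
  unfold solution
  simp only [h1]
  have h2' := h2 (PySem.Dict.counter (pvBigs s1)) 0 ((0 : Int) + ((pvBigs s1).length : Int))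
  have hfst : ∀ (p : Int × Int) (q : PySem.Dict String Int × Int × Int),
      q.2 = p → q.2.1 = p.1 ∧ q.2.2 = p.2 := by
    intro p q hq; exact ⟨by rw [hq], by rw [hq]⟩
  obtain ⟨ha, hb⟩ := hfst _ _ h2'
  rw [ha, hb, hM]
  norm_num

/-- The list Source B sorts is exactly `pvBigs`. -/
lemma map_range_take2 :
    ∀ l : List Char,
      (List.range (l.length - 1)).map (fun k => String.ofList ((l.drop k).take 2))
        = pvPairs l
  | [] => by simp [pvPairs]
  | [_] => by simp [pvPairs]
  | a :: b :: t => by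
      have hlen : (a :: b :: t).length - 1 = t.length + 1 := by simp
      rw [hlen, List.range_succ_eq_map, List.map_cons, List.map_map]
      simp only [List.drop_zero, List.take_succ_cons, List.take_zero]
      rw [show pvPairs (a :: b :: t) = String.ofList [a, b] :: pvPairs (b :: t) from rfl,
        ← map_range_take2 (b :: t)]
      rfl

lemma bigramList_eq (s : String) :
    ((PySem.List.pyRange 0 (PySem.Str.len (PySem.Str.lower s) - 1) 1).map
        (fun i => PySem.Str.slice (PySem.Str.lower s) (some i) (some (i + 2)))).filter
      (fun b => PySem.Str.strIsalpha b) = pvBigs s := by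
  unfold pvBigs
  congr 1
  rw [PySem.List.pyRange_one, List.map_map]
  have hbody : ((fun i => PySem.Str.slice (PySem.Str.lower s) (some i) (some (i + 2)))
      ∘ (fun k : Nat => (0 : Int) + (k : Int)))
      = fun k : Nat => String.ofList (((PySem.Str.lower s).toList.drop k).take 2) := by
    funext k
    simp only [Function.comp, PySem.Str.slice, PySem.Chars.slice_eq_listSlice]
    rw [show ((0 : Int) + (k : Int)) = ((k : Nat) : Int) by ring]
    rw [show (((k : Nat) : Int) + 2) = ((k + 2 : Nat) : Int) by push_cast; ring]
    rw [PySem.List.slice_natCast, Nat.add_sub_cancel_left]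
  rw [hbody]
  have htn : (PySem.Str.len (PySem.Str.lower s) - 1 - 0).toNat
      = (PySem.Str.lower s).toList.length - 1 := by
    have := PySem.Str.len_eq (PySem.Str.lower s)
    omega
  rw [htn, map_range_take2]

lemma sortedBigrams_eq (s : String) :
    sortedBigrams s = PySem.List.sorted (pvBigs s) (fun x => x) false := by
  unfold sortedBigrams
  dsimp only
  rw [bigramList_eq s]

/-- Two-pointer merge of sorted lists counts the multiset intersection. -/
lemma interCount_eq_card :
    ∀ (a b : List String), a.Pairwise (· ≤ ·) → b.Pairwise (· ≤ ·) →
      interCount a b = (((a : Multiset String) ∩ (b : Multiset String)).card : Int)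
  | [], b, _, _ => by simp [interCount]
  | x :: a, [], _, _ => by simp [interCount]
  | x :: a, y :: b, ha, hb => by
      rw [List.pairwise_cons] at ha hb
      rw [interCount]
      by_cases hxy : x = y
      · subst hxy
        rw [if_pos rfl, interCount_eq_card a b ha.2 hb.2]
        have hms : ((x :: a : List String) : Multiset String)
              ∩ ((x :: b : List String) : Multiset String)
            = x ::ₘ ((a : Multiset String) ∩ (b : Multiset String)) := by
          rw [← Multiset.cons_coe, ← Multiset.cons_coe,
            Multiset.cons_inter_of_pos _ (Multiset.mem_cons_self x _),
            Multiset.erase_cons_head]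
        rw [hms, Multiset.card_cons]
        push_cast
        ring
      · by_cases hlt : x < y
        · rw [if_neg hxy, if_pos hlt, interCount_eq_card a (y :: b) ha.2
            (List.pairwise_cons.2 hb)]
          have hnm : x ∉ ((y :: b : List String) : Multiset String) := by
            intro hmem
            rw [Multiset.mem_coe, List.mem_cons] at hmem
            rcases hmem with h | h
            · exact hxy h
            · exact absurd (lt_of_lt_of_le hlt (hb.1 _ h)) (lt_irrefl x)
          have hms : ((x :: a : List String) : Multiset String)
                ∩ ((y :: b : List String) : Multiset String)
              = ((a : Multiset String) ∩ ((y :: b : List String) : Multiset String)) := by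
            rw [← Multiset.cons_coe x a]
            exact Multiset.cons_inter_of_neg _ hnm
          rw [hms]
        · have hyx : y < x := by
            rcases lt_trichotomy x y with h | h | h
            · exact absurd h hlt
            · exact absurd h hxy
            · exact h
          rw [if_neg hxy, if_neg hlt, interCount_eq_card (x :: a) b
            (List.pairwise_cons.2 ha) hb.2]
          have hnm : y ∉ ((x :: a : List String) : Multiset String) := by
            intro hmem
            rw [Multiset.mem_coe, List.mem_cons] at hmem
            rcases hmem with h | h
            · exact hxy h.symm
            · exact absurd (lt_of_lt_of_le hyx (ha.1 _ h)) (lt_irrefl y)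
          have hms : ((x :: a : List String) : Multiset String)
                ∩ ((y :: b : List String) : Multiset String)
              = (((x :: a : List String) : Multiset String) ∩ (b : Multiset String)) := by
            rw [Multiset.inter_comm, ← Multiset.cons_coe y b,
              Multiset.cons_inter_of_neg _ hnm, Multiset.inter_comm]
          rw [hms]
  termination_by a b => a.length + b.length

/-- The multiset-intersection card is the sum of per-key minima over str1's support. -/
lemma card_inter_eq_interVal (s1 s2 : String) :
    ((((pvBigs s1 : List String) : Multiset String)
        ∩ ((pvBigs s2 : List String) : Multiset String)).card : Int)
      = pvInterVal s1 s2 := by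
  set m : Multiset String :=
    ((pvBigs s1 : List String) : Multiset String) ∩ ((pvBigs s2 : List String) : Multiset String)
    with hm
  have hsub : m.toFinset ⊆ (pvBigs s1).toFinset := by
    intro k hk
    rw [Multiset.mem_toFinset, hm, Multiset.mem_inter] at hk
    rw [List.mem_toFinset]
    exact Multiset.mem_coe.mp hk.1
  rw [← Multiset.toFinset_sum_count_eq m]
  have hext : ∑ k ∈ m.toFinset, m.count k = ∑ k ∈ (pvBigs s1).toFinset, m.count k := by
    refine Finset.sum_subset hsub (fun k _ hk => ?_)
    rw [Multiset.mem_toFinset] at hk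
    exact Multiset.count_eq_zero_of_notMem hk
  rw [hext, Nat.cast_sum]
  unfold pvInterVal
  refine Finset.sum_congr rfl (fun k _ => ?_)
  rw [hm, Multiset.count_inter, Multiset.coe_count, Multiset.coe_count, Nat.cast_min]

/-- B's whole computation, in the same closed form as A's. -/
lemma alt_eqn (s1 s2 : String) :
    solution_alt s1 s2 =
      (if ((pvBigs s1).length : Int) + ((pvBigs s2).length : Int) - pvInterVal s1 s2 = 0
       then 65536
       else PySem.Int.floordiv (pvInterVal s1 s2 * 65536)
         (((pvBigs s1).length : Int) + ((pvBigs s2).length : Int) - pvInterVal s1 s2)) := by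
  unfold solution_alt
  dsimp only
  rw [sortedBigrams_eq s1, sortedBigrams_eq s2]
  have hperm1 := PySem.List.sorted_perm (pvBigs s1) (fun x => x) false
  have hperm2 := PySem.List.sorted_perm (pvBigs s2) (fun x => x) false
  have hI : interCount (PySem.List.sorted (pvBigs s1) (fun x => x) false)
      (PySem.List.sorted (pvBigs s2) (fun x => x) false) = pvInterVal s1 s2 := by
    rw [interCount_eq_card _ _
      (PySem.List.sorted_pairwise (pvBigs s1) (fun x => x))
      (PySem.List.sorted_pairwise (pvBigs s2) (fun x => x))]
    rw [Multiset.coe_eq_coe.mpr hperm1, Multiset.coe_eq_coe.mpr hperm2]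
    exact card_inter_eq_interVal s1 s2
  rw [hI, hperm1.length_eq, hperm2.length_eq]

-- ===== VERDICT (by name: the statement is the Claim_ definition above) =====
theorem solution_spec : Claim_equal_solution := by
  intro s1 s2 _
  show solution s1 s2 = solution_alt s1 s2
  rw [solution_eqn, alt_eqn]
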